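-- pv_equiv track=rewrite | github.com/b-k-ideta/things | practices/chapter6/practice6-10.py | bar
-- ===== SOURCE A (Python) =====
-- def bar(array):
--     cnt =1
--     array2 = []
--     for i in range(len(array)):
--         if cnt == 1:
--             array2.append("○")
--             cnt +=1
--         if cnt == 2:
--             array2.append("△")
--             cnt +=1
--         if cnt == 3:
--             array2.append("□")
--             cnt +=1
--         if cnt == 4:
--             array2.append("×")
--             cnt = 1
--     return array2
-- ===== SOURCE B (Python) =====
-- def bar(array):
--     return ["○", "△", "□", "×"] * len(array)
-- ===== Notes on version B (the rewrite author's own statement) =====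
-- stated objective: simpler
-- what changed: The counter-driven loop with a cascade of non-elif branches always appends all four symbols per element, so B returns the closed form ['○','△','□','×'] * len(array) with no loop or counter.
import Mathlib
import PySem

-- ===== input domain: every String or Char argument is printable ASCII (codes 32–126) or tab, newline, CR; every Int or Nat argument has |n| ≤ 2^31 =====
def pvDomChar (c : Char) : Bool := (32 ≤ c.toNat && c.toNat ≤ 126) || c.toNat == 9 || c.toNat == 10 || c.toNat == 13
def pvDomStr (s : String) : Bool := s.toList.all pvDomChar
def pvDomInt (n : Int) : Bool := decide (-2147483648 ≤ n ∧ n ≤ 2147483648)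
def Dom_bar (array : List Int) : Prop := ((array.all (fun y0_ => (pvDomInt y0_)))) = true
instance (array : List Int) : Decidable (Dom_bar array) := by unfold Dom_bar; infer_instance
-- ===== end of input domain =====

-- B replaces A's counter-driven loop (whose four non-elif branches fire every iteration) with the closed form: the block ["○","△","□","×"] replicated len(array) times — simpler, same cost.


-- ===== PORT A =====
-- Literal port of A: loop over range(len(array)) carrying (cnt, array2),
-- each iteration runs the four non-elif if-blocks in order.
def barStep (st : Int × List String) : Int × List String :=
  let (cnt, array2) := st
  let (cnt, array2) := if cnt == 1 then (cnt + 1, array2 ++ ["○"]) else (cnt, array2)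
  let (cnt, array2) := if cnt == 2 then (cnt + 1, array2 ++ ["△"]) else (cnt, array2)
  let (cnt, array2) := if cnt == 3 then (cnt + 1, array2 ++ ["□"]) else (cnt, array2)
  let (cnt, array2) := if cnt == 4 then ((1 : Int), array2 ++ ["×"]) else (cnt, array2)
  (cnt, array2)

def bar (array : List Int) : List String :=
  ((PySem.List.pyRange 0 (array.length) 1).foldl (fun st _ => barStep st) ((1 : Int), [])).2

-- ===== PORT B =====
-- B: closed form, the fixed block replicated len(array) times.
def bar_alt (array : List Int) : List String :=
  (List.replicate array.length ["○", "△", "□", "×"]).flatten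

-- ===== PRECONDITION & SPEC =====
def Spec_bar (array : List Int) (out : List String) : Prop := out = bar_alt array
instance (array : List Int) (out : List String) : Decidable (Spec_bar array out) := by unfold Spec_bar; infer_instance

-- ===== CLAIM (what is proved, stated in full; the proofs are below) =====
def Claim_equal_bar : Prop := ∀ (array : List Int), Dom_bar array → Spec_bar array (bar array)

-- ===== LEMMAS AND PROOFS =====

-- ===== VERDICT (by name: the statement is the Claim_ definition above) =====
theorem foldl_barStep (n : Nat) (acc : List String) :
    ((List.replicate n (0 : Int)).foldl (fun st _ => barStep st) ((1 : Int), acc)).2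
      = acc ++ (List.replicate n ["○", "△", "□", "×"]).flatten := by
  induction n generalizing acc with
  | zero => simp
  | succ k ih =>
      rw [List.replicate_succ, List.foldl_cons]
      have hstep : barStep ((1 : Int), acc) = ((1 : Int), acc ++ ["○", "△", "□", "×"]) := by
        simp [barStep]
      rw [hstep, ih]
      simp [List.replicate_succ]

theorem foldl_len_only (l : List Int) (st : Int × List String) :
    l.foldl (fun st _ => barStep st) st
      = (List.replicate l.length (0 : Int)).foldl (fun st _ => barStep st) st := by
  induction l generalizing st with
  | nil => simp
  | cons a t ih => simp [List.replicate_succ, ih]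

theorem bar_spec : Claim_equal_bar := by
  intro array _
  unfold Spec_bar bar bar_alt
  rw [foldl_len_only]
  rw [show (PySem.List.pyRange 0 (array.length : Int) 1).length = array.length by
        simp [PySem.List.length_pyRange_one]]
  simpa using foldl_barStep array.length []
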